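-- pv_equiv track=rewrite | github.com/nishatsalsabil/Newman-Conway-Sequence | lib/newman_conway.py | newman_conway
-- ===== SOURCE A (Python) =====
-- def newman_conway(num):
--     """ Returns a list of the Newman Conway numbers for the given value.
--         Time Complexity: ?
--         Space Complexity: ?
--     """
--     if num < 1:
--         raise ValueError
--     else:
--         arr = [0, 1, 1]
--
--     if num == 1:
--         return str(1)
--     else:
--         for i in range(3, num + 1):
--             p = arr[arr[i - 1]] + arr[i - arr[i - 1]]
--             arr.append(p)
--     data = ' '.join(str(n) for n in arr[1:])
--
--     return data
-- ===== SOURCE B (Python) =====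
-- def newman_conway(num):
--     if num < 1:
--         raise ValueError
--     if num == 1:
--         return str(1)
--     memo = {1: 1, 2: 1}
--
--     def p(n):
--         if n in memo:
--             return memo[n]
--         q = p(n - 1)
--         v = p(q) + p(n - q)
--         memo[n] = v
--         return v
--
--     return ' '.join(str(p(i)) for i in range(1, num + 1))
-- ===== Notes on version B (the rewrite author's own statement) =====
-- stated objective: alternative
-- what changed: A fills a flat array bottom-up with direct indexing; B computes each term by top-down memoized recursion on the recurrence P(n)=P(P(n-1))+P(n-P(n-1)) over a dict, joining P(1)..P(num).
import Mathlib
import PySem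

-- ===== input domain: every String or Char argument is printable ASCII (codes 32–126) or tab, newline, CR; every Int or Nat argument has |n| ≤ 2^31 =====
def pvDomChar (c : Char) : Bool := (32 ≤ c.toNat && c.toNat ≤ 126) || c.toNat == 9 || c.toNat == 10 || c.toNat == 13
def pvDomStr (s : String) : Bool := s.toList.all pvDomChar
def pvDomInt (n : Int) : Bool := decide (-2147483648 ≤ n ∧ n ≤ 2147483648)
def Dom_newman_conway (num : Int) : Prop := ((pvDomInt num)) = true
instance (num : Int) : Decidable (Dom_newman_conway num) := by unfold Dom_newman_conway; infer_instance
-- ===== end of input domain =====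

-- B replaces A's bottom-up array fill by a top-down memoized recursion on P(n)=P(P(n-1))+P(n-P(n-1)); objective: alternative (same cost).

-- ===== PORT A =====
-- A's loop body: p = arr[arr[i-1]] + arr[i - arr[i-1]]; arr.append(p).
-- Indexing is ported with pyGetD (default 0): for every num admitted by Pre_ all four
-- indices are in range (proved below), so the default is never used.
def aStep (arr : List Int) (i : Int) : List Int :=
  arr ++ [PySem.List.pyGetD arr (PySem.List.pyGetD arr (i - 1) 0) 0 +
          PySem.List.pyGetD arr (i - PySem.List.pyGetD arr (i - 1) 0) 0]

def newman_conway (num : Int) : String :=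
  if num < 1 then ""   -- Python raises ValueError here; excluded by Pre_
  else
    let arr : List Int := [0, 1, 1]
    if num = 1 then PySem.Int.toStr 1
    else
      let arr := (PySem.List.pyRange 3 (num + 1) 1).foldl aStep arr
      PySem.Str.join " " ((PySem.List.slice arr (some 1) none).map PySem.Int.toStr)

-- ===== PORT B =====
-- def p(n): memoized recursion; the Nat fuel argument is only a totality guard
-- (every recursive call is on an argument < n, and fuel > n at every call site).
def bRec : Nat → Int → PySem.Dict Int Int → Int × PySem.Dict Int Int
  | 0, _, memo => (0, memo)          -- unreachable: fuel > n at every call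
  | fuel + 1, n, memo =>
    match memo.get? n with
    | some v => (v, memo)
    | none =>
      let r1 := bRec fuel (n - 1) memo
      let r2 := bRec fuel r1.1 r1.2
      let r3 := bRec fuel (n - r1.1) r2.2
      let v := r2.1 + r3.1
      (v, r3.2.insert n v)

def newman_conway_alt (num : Int) : String :=
  if num < 1 then ""   -- Python raises ValueError here; excluded by Pre_
  else if num = 1 then PySem.Int.toStr 1
  else
    let memo := ((PySem.Dict.empty).insert 1 (1 : Int)).insert 2 (1 : Int)
    let r := (PySem.List.pyRange 1 (num + 1) 1).foldl
      (fun (acc : List Int × PySem.Dict Int Int) i =>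
        let s := bRec (i.toNat + 1) i acc.2
        (acc.1 ++ [s.1], s.2))
      ([], memo)
    PySem.Str.join " " (r.1.map PySem.Int.toStr)

-- ===== PRECONDITION & SPEC =====
-- Pre_ excludes exactly num < 1, where the Python A raises ValueError.
def Pre_newman_conway (num : Int) : Prop := 1 ≤ num
instance (num : Int) : Decidable (Pre_newman_conway num) := by unfold Pre_newman_conway; infer_instance
def pvWitness_newman_conway : Int := 5

def Spec_newman_conway (num : Int) (out : String) : Prop := out = newman_conway_alt num
instance (num : Int) (out : String) : Decidable (Spec_newman_conway num out) := by unfold Spec_newman_conway; infer_instance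

-- ===== CLAIM (what is proved, stated in full; the proofs are below) =====
def Claim_equal_newman_conway : Prop := ∀ (num : Int), Dom_newman_conway num → Pre_newman_conway num → Spec_newman_conway num (newman_conway num)

-- ===== LEMMAS AND PROOFS =====

-- Reference table: aTab k = A's arr after the loop iterations i = 3 .. k+2.
def aTab : Nat → List Int
  | 0 => [0, 1, 1]
  | k + 1 => aStep (aTab k) ((k : Int) + 3)

-- P n = the Newman–Conway value stored at index n.
def P (n : Nat) : Int := (aTab n).getD n 0

lemma length_aTab (k : Nat) : (aTab k).length = k + 3 := by
  induction k with
  | zero => rfl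
  | succ k ih => simp [aTab, aStep, ih]

lemma getD_aTab_succ (k j : Nat) (h : j < k + 3) :
    (aTab (k + 1)).getD j 0 = (aTab k).getD j 0 := by
  have hl : j < (aTab k).length := by rw [length_aTab]; omega
  simp [aTab, aStep, List.getD, List.getElem?_append_left hl]

lemma getD_aTab_of_le (k k' j : Nat) (hkk : k ≤ k') (h : j < k + 3) :
    (aTab k').getD j 0 = (aTab k).getD j 0 := by
  obtain ⟨d, rfl⟩ := Nat.exists_eq_add_of_le hkk
  induction d with
  | zero => rfl
  | succ m ih => rw [← Nat.add_assoc, getD_aTab_succ (k + m) j (by omega), ih (by omega)]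

lemma getD_aTab_eq_P (k n : Nat) (h : n ≤ k + 2) : (aTab k).getD n 0 = P n := by
  rcases Nat.le_total k n with hle | hle
  · rw [P, getD_aTab_of_le k n n hle (by omega)]
  · rw [P, getD_aTab_of_le n k n hle (by omega)]

lemma aTab_succ_last (k : Nat) :
    (aTab (k + 1)).getD (k + 3) 0 = P (k + 3) :=
  getD_aTab_eq_P (k + 1) (k + 3) (by omega)

lemma P_one : P 1 = 1 := rfl
lemma P_two : P 2 = 1 := rfl

-- The recurrence, read off aStep, once the index P(k+2) is known to be in range.
lemma P_rec (k : Nat) (h1 : 1 ≤ P (k + 2)) (h2 : P (k + 2) ≤ (k : Int) + 2) :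
    P (k + 3) = P (P (k + 2)).toNat + P (k + 3 - (P (k + 2)).toNat) := by
  have hlen : (aTab k).length = k + 3 := length_aTab k
  have hget : ∀ i : Int, 0 ≤ i → i ≤ (k : Int) + 2 →
      PySem.List.pyGetD (aTab k) i 0 = P i.toNat := by
    intro i h0 h2
    rw [PySem.List.pyGetD_eq_getElem (aTab k) 0 h0 (by rw [hlen]; push_cast; omega)]
    rw [← List.getD_eq_getElem (aTab k) 0 (by rw [hlen]; omega)]
    exact getD_aTab_eq_P k i.toNat (by omega)
  have h3 : P (k + 3) = (aTab (k + 1)).getD (k + 3) 0 := (aTab_succ_last k).symm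
  rw [h3]
  show (aStep (aTab k) ((k : Int) + 3)).getD (k + 3) 0 = _
  unfold aStep
  have happ : ∀ x : Int, (aTab k ++ [x]).getD (k + 3) 0 = x := by
    intro x
    rw [List.getD_eq_getElem _ 0 (by simp [hlen])]
    rw [List.getElem_append_right (by omega)]
    simp [hlen]
  rw [happ]
  have hidx : ((k : Int) + 3 - 1) = ((k + 2 : Nat) : Int) := by push_cast; ring
  rw [hidx, PySem.List.pyGetD_natCast, getD_aTab_eq_P k (k + 2) (by omega)]
  rw [hget (P (k + 2)) (by omega) h2]
  rw [hget ((k : Int) + 3 - P (k + 2)) (by omega) (by omega)]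
  congr 1
  congr 1
  omega

-- 1 ≤ P n ≤ n for n ≥ 1.
lemma P_bounds : ∀ n : Nat, 1 ≤ n → 1 ≤ P n ∧ P n ≤ (n : Int) := by
  intro n
  induction n using Nat.strong_induction_on with
  | _ n ih =>
    intro h1
    match n, h1 with
    | 1, _ => exact ⟨by rw [P_one], by rw [P_one]; norm_num⟩
    | 2, _ => exact ⟨by rw [P_two], by rw [P_two]; norm_num⟩
    | (k + 3), _ =>
      obtain ⟨hq1, hq2⟩ := ih (k + 2) (by omega) (by omega)
      have hrec := P_rec k hq1 hq2
      set q := P (k + 2) with hqdef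
      have hql : 1 ≤ q.toNat := by omega
      have hqu : q.toNat ≤ k + 2 := by omega
      obtain ⟨ha1, ha2⟩ := ih q.toNat (by omega) hql
      obtain ⟨hb1, hb2⟩ := ih (k + 3 - q.toNat) (by omega) (by omega)
      refine ⟨by rw [hrec]; omega, by rw [hrec]; push_cast; omega⟩

-- aTab in closed map form.
lemma aTab_eq_map (k : Nat) :
    aTab k = 0 :: (List.range (k + 2)).map (fun j => P (j + 1)) := by
  induction k with
  | zero =>
    show ([0, 1, 1] : List Int) = _
    simp [List.range_succ, P_one, P_two]
  | succ k ih =>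
    have hsucc : aTab (k + 1) = aTab k ++ [P (k + 3)] := by
      have hlen : (aTab k).length = k + 3 := length_aTab k
      have hlast := aTab_succ_last k
      show aStep (aTab k) ((k : Int) + 3) = _
      unfold aStep
      congr 1
      have : (aTab (k + 1)).getD (k + 3) 0
          = PySem.List.pyGetD (aTab k) (PySem.List.pyGetD (aTab k) ((k : Int) + 3 - 1) 0) 0 +
            PySem.List.pyGetD (aTab k) ((k : Int) + 3 - PySem.List.pyGetD (aTab k) ((k : Int) + 3 - 1) 0) 0 := by
        show (aStep (aTab k) ((k : Int) + 3)).getD (k + 3) 0 = _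
        unfold aStep
        rw [List.getD_eq_getElem _ 0 (by simp [hlen])]
        rw [List.getElem_append_right (by omega)]
        simp [hlen]
      rw [← hlast, this]
    rw [hsucc, ih]
    simp [List.range_succ]

-- A's loop equals aTab.
lemma foldA (m : Nat) :
    (PySem.List.pyRange 3 ((m : Int) + 3) 1).foldl aStep [0, 1, 1] = aTab m := by
  induction m with
  | zero => rw [show ((0 : Nat) : Int) + 3 = 3 by norm_num, PySem.List.pyRange_one_eq_nil le_rfl]; rfl
  | succ m ih =>
    have hsplit : ((m + 1 : Nat) : Int) + 3 = ((m : Int) + 3) + 1 := by push_cast; ring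
    rw [hsplit, PySem.List.pyRange_one_succ_right (by omega), List.foldl_append, ih]
    rfl

-- Invariant on B's memo dict.
def MemoInv (d : PySem.Dict Int Int) : Prop :=
  d.get? 1 = some 1 ∧ d.get? 2 = some 1 ∧
  ∀ k v : Int, d.get? k = some v → 1 ≤ k ∧ v = P k.toNat

lemma MemoInv_insert (d : PySem.Dict Int Int) (n : Int) (h : MemoInv d) (hn : 1 ≤ n) :
    MemoInv (d.insert n (P n.toNat)) := by
  obtain ⟨h1, h2, h3⟩ := h
  refine ⟨?_, ?_, ?_⟩
  · rw [PySem.Dict.get?_insert]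
    split_ifs with e
    · rw [← e]; rfl
    · exact h1
  · rw [PySem.Dict.get?_insert]
    split_ifs with e
    · rw [← e]; rfl
    · exact h2
  · intro k v hk
    rw [PySem.Dict.get?_insert] at hk
    split_ifs at hk with e
    · exact ⟨by omega, by rw [e]; cases hk; rfl⟩
    · exact h3 k v hk

lemma Inv_init : MemoInv (((PySem.Dict.empty : PySem.Dict Int Int).insert 1 (1 : Int)).insert 2 (1 : Int)) := by
  refine ⟨?_, ?_, ?_⟩
  · rw [PySem.Dict.get?_insert, if_neg (by norm_num), PySem.Dict.get?_insert, if_pos rfl]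
  · rw [PySem.Dict.get?_insert, if_pos rfl]
  · intro k v hk
    rw [PySem.Dict.get?_insert, PySem.Dict.get?_insert] at hk
    split_ifs at hk with e2 e1
    · cases hk; exact ⟨by omega, by rw [e2]; rfl⟩
    · cases hk; exact ⟨by omega, by rw [e1]; rfl⟩
    · rw [PySem.Dict.get?_empty] at hk; cases hk

lemma bRec_correct : ∀ (fuel : Nat) (n : Int) (memo : PySem.Dict Int Int),
    MemoInv memo → 1 ≤ n → n < (fuel : Int) →
    (bRec fuel n memo).1 = P n.toNat ∧ MemoInv (bRec fuel n memo).2 := by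
  intro fuel
  induction fuel with
  | zero => intro n memo _ h1 hf; exact absurd hf (by push_cast; omega)
  | succ fuel ih =>
    intro n memo hInv h1 hf
    cases hg : memo.get? n with
    | some v =>
      have hv := hInv.2.2 n v hg
      simp only [bRec, hg]
      exact ⟨hv.2, hInv⟩
    | none =>
      have hn1 : n ≠ 1 := fun e => by rw [e, hInv.1] at hg; cases hg
      have hn2 : n ≠ 2 := fun e => by rw [e, hInv.2.1] at hg; cases hg
      have h3n : 3 ≤ n := by omega
      have hfu : n ≤ (fuel : Int) := by push_cast at hf; omega
      obtain ⟨hq, hI1⟩ := ih (n - 1) memo hInv (by omega) (by omega)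
      have hP1 := P_bounds (n - 1).toNat (by omega)
      set r1 := bRec fuel (n - 1) memo with hr1
      have hq1 : 1 ≤ r1.1 := by rw [hq]; exact hP1.1
      have hq2 : r1.1 ≤ n - 1 := by
        rw [hq]
        calc P (n - 1).toNat ≤ (((n - 1).toNat : Nat) : Int) := hP1.2
          _ = n - 1 := by omega
      obtain ⟨ha, hI2⟩ := ih r1.1 r1.2 hI1 hq1 (by omega)
      set r2 := bRec fuel r1.1 r1.2 with hr2
      obtain ⟨hb, hI3⟩ := ih (n - r1.1) r2.2 hI2 (by omega) (by omega)
      set r3 := bRec fuel (n - r1.1) r2.2 with hr3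
      have hval : r2.1 + r3.1 = P n.toNat := by
        obtain ⟨k, hk⟩ : ∃ k, n.toNat = k + 3 := ⟨n.toNat - 3, by omega⟩
        have hk2 : (n - 1).toNat = k + 2 := by omega
        rw [ha, hb, hq, hk2, hk]
        have hb1 : 1 ≤ P (k + 2) := by rw [← hk2]; exact hP1.1
        have hb2 : P (k + 2) ≤ (k : Int) + 2 := by
          rw [← hk2]
          calc P (n - 1).toNat ≤ (((n - 1).toNat : Nat) : Int) := hP1.2
            _ = ((k : Int)) + 2 := by omega
        rw [P_rec k hb1 hb2]
        congr 2
        omega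
      simp only [bRec, hg]
      refine ⟨hval, ?_⟩
      have hins := MemoInv_insert r3.2 n hI3 (by omega)
      rwa [← hval] at hins

lemma foldB (m : Nat) :
    ((PySem.List.pyRange 1 ((m : Int) + 1) 1).foldl
      (fun (acc : List Int × PySem.Dict Int Int) i =>
        let s := bRec (i.toNat + 1) i acc.2
        (acc.1 ++ [s.1], s.2))
      ([], ((PySem.Dict.empty : PySem.Dict Int Int).insert 1 (1 : Int)).insert 2 (1 : Int))).1
      = (List.range m).map (fun j => P (j + 1)) := by
  have main : ∀ (m : Nat) (acc : List Int) (d : PySem.Dict Int Int), MemoInv d →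
      ((PySem.List.pyRange 1 ((m : Int) + 1) 1).foldl
        (fun (acc : List Int × PySem.Dict Int Int) i =>
          let s := bRec (i.toNat + 1) i acc.2
          (acc.1 ++ [s.1], s.2))
        (acc, d)).1 = acc ++ (List.range m).map (fun j => P (j + 1)) ∧
      MemoInv ((PySem.List.pyRange 1 ((m : Int) + 1) 1).foldl
        (fun (acc : List Int × PySem.Dict Int Int) i =>
          let s := bRec (i.toNat + 1) i acc.2
          (acc.1 ++ [s.1], s.2))
        (acc, d)).2 := by
    intro m
    induction m with
    | zero =>
      intro acc d hd
      rw [show ((0 : Nat) : Int) + 1 = 1 by norm_num, PySem.List.pyRange_one_eq_nil le_rfl]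
      simpa using hd
    | succ m ih =>
      intro acc d hd
      have hsplit : ((m + 1 : Nat) : Int) + 1 = ((m : Int) + 1) + 1 := by push_cast; ring
      rw [hsplit, PySem.List.pyRange_one_succ_right (by omega), List.foldl_append]
      obtain ⟨ih1, ih2⟩ := ih acc d hd
      set F := (PySem.List.pyRange 1 ((m : Int) + 1) 1).foldl
        (fun (acc : List Int × PySem.Dict Int Int) i =>
          let s := bRec (i.toNat + 1) i acc.2
          (acc.1 ++ [s.1], s.2)) (acc, d) with hF
      have htn : ((m : Int) + 1).toNat = m + 1 := by omega
      obtain ⟨hv, hI⟩ := bRec_correct (((m : Int) + 1).toNat + 1) ((m : Int) + 1) F.2 ih2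
        (by omega) (by push_cast; omega)
      simp only [List.foldl_cons, List.foldl_nil]
      refine ⟨?_, hI⟩
      rw [ih1, hv, htn, List.range_succ]
      simp
  have h := (main m [] _ Inv_init).1
  simpa using h

-- ===== VERDICT (by name: the statement is the Claim_ definition above) =====
theorem newman_conway_spec : Claim_equal_newman_conway := by
  intro num _ hpre
  have hpre' : 1 ≤ num := hpre
  show newman_conway num = newman_conway_alt num
  by_cases h1 : num = 1
  · subst h1; rfl
  · have h2 : 2 ≤ num := by omega
    simp only [newman_conway, newman_conway_alt, if_neg (show ¬ num < 1 by omega), if_neg h1]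
    have hA : (num : Int) + 1 = (((num - 2).toNat : Nat) : Int) + 3 := by omega
    have hB : (num : Int) + 1 = ((num.toNat : Nat) : Int) + 1 := by omega
    have hm : (num - 2).toNat + 2 = num.toNat := by omega
    conv_lhs => rw [hA, foldA, aTab_eq_map, PySem.List.slice_from_one, List.tail_cons, hm]
    conv_rhs => rw [hB, foldB]
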